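-- pv_equiv track=rewrite | github.com/duri-duri/DuRiWorkspace | backups/current_backup/duri_control/app/services/log_service.py | _extract_log_level
-- ===== SOURCE A (Python) =====
-- def _extract_log_level(message: str) -> str:
--     """로그 메시지에서 레벨 추출"""
--     message_upper = message.upper()
--
--     if any(level in message_upper for level in ["ERROR", "CRITICAL", "FATAL"]):
--         return "ERROR"
--     elif "WARNING" in message_upper or "WARN" in message_upper:
--         return "WARNING"
--     elif "DEBUG" in message_upper:
--         return "DEBUG"
--     else:
--         return "INFO"
-- ===== SOURCE B (Python) =====
-- _RANKED_KEYWORDS = (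
--     ("ERROR", 3), ("CRITICAL", 3), ("FATAL", 3),
--     ("WARNING", 2), ("WARN", 2), ("DEBUG", 1),
-- )
-- _LEVEL_BY_RANK = ("INFO", "DEBUG", "WARNING", "ERROR")
--
--
-- def _extract_log_level(message: str) -> str:
--     """Single left-to-right scan: keep the highest severity rank of any
--     keyword occurrence found at any position, then map rank -> level."""
--     u = message.upper()
--     best = 0
--     for i in range(len(u)):
--         for kw, rank in _RANKED_KEYWORDS:
--             if best < rank and u.startswith(kw, i):
--                 best = rank
--     return _LEVEL_BY_RANK[best]
-- ===== Notes on version B (the rewrite author's own statement) =====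
-- stated objective: alternative
-- what changed: Replaces A's priority-ordered per-keyword whole-string substring searches with a single left-to-right scan over positions that keeps the maximum severity rank of any keyword starting there, then maps rank to level.
import Mathlib
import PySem

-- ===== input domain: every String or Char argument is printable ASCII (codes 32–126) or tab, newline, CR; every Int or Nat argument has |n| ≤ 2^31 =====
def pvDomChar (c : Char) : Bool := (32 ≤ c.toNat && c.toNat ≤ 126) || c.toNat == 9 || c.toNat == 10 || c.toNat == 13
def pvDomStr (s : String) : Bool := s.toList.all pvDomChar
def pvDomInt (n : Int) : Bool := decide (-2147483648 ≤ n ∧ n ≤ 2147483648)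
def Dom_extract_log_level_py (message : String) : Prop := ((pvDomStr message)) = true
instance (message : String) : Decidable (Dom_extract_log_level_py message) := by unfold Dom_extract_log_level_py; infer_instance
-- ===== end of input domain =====

-- B replaces A's priority-ordered whole-string substring searches by one left-to-right
-- position scan keeping the maximum severity rank found, then maps rank -> level (alternative; same cost).

-- ===== PORT A =====
def extract_log_level_py (message : String) : String :=
  let message_upper := PySem.Str.upper message
  if ["ERROR", "CRITICAL", "FATAL"].any (fun level => PySem.Str.isIn level message_upper) then
    "ERROR"
  else if PySem.Str.isIn "WARNING" message_upper || PySem.Str.isIn "WARN" message_upper then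
    "WARNING"
  else if PySem.Str.isIn "DEBUG" message_upper then
    "DEBUG"
  else
    "INFO"

-- ===== PORT B =====
def pvRankedKeywords : List (List Char × Nat) :=
  [("ERROR".toList, 3), ("CRITICAL".toList, 3), ("FATAL".toList, 3),
   ("WARNING".toList, 2), ("WARN".toList, 2), ("DEBUG".toList, 1)]

-- inner 'for kw, rank in _RANKED_KEYWORDS' body at position i (u.startswith(kw, i) = kw <+: u.drop i)
def pvStep (u : List Char) (best : Nat) (i : Nat) : Nat :=
  pvRankedKeywords.foldl
    (fun b p => if b < p.2 && PySem.Chars.startswith (u.drop i) p.1 then p.2 else b) best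

def extract_log_level_py_alt (message : String) : String :=
  let u := (PySem.Str.upper message).toList
  let best := (List.range u.length).foldl (pvStep u) 0
  ["INFO", "DEBUG", "WARNING", "ERROR"].getD best "INFO"

-- ===== PRECONDITION & SPEC =====
def Spec_extract_log_level_py (message : String) (out : String) : Prop := out = extract_log_level_py_alt message
instance (message : String) (out : String) : Decidable (Spec_extract_log_level_py message out) := by unfold Spec_extract_log_level_py; infer_instance

-- ===== CLAIM =====
def Claim_equal_extract_log_level_py : Prop := ∀ (message : String), Dom_extract_log_level_py message → Spec_extract_log_level_py message (extract_log_level_py message)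

-- ===== LEMMAS AND PROOFS =====

-- the inner keyword fold never decreases the accumulator
theorem pv_inner_ge (u : List Char) (i : Nat) :
    ∀ (l : List (List Char × Nat)) (b : Nat),
      b ≤ l.foldl (fun b p => if b < p.2 && PySem.Chars.startswith (u.drop i) p.1 then p.2 else b) b := by
  intro l
  induction l with
  | nil => intro b; simp
  | cons q t ih =>
    intro b
    simp only [List.foldl]
    refine le_trans ?_ (ih _)
    by_cases h : (b < q.2 && PySem.Chars.startswith (u.drop i) q.1) = true
    · simp only [h, if_true]
      simp only [Bool.and_eq_true, decide_eq_true_eq] at h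
      omega
    · simp [h]

-- upper bound: if every keyword that starts at i has rank ≤ k, the inner fold stays ≤ k
theorem pv_inner_upper (u : List Char) (i k : Nat) :
    ∀ (l : List (List Char × Nat)),
      (∀ p ∈ l, PySem.Chars.startswith (u.drop i) p.1 = true → p.2 ≤ k) →
      ∀ b, b ≤ k →
      l.foldl (fun b p => if b < p.2 && PySem.Chars.startswith (u.drop i) p.1 then p.2 else b) b ≤ k := by
  intro l
  induction l with
  | nil => intro _ b hb; simpa using hb
  | cons q t ih =>
    intro hl b hb
    simp only [List.foldl]
    refine ih (fun p hp => hl p (List.mem_cons_of_mem _ hp)) _ ?_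
    by_cases h : (b < q.2 && PySem.Chars.startswith (u.drop i) q.1) = true
    · simp only [h, if_true]
      simp only [Bool.and_eq_true, decide_eq_true_eq] at h
      exact hl q (List.mem_cons_self) h.2
    · simpa [h] using hb

-- lower bound: a keyword of the table starting at i pushes the inner fold to at least its rank
theorem pv_inner_lower (u : List Char) (i : Nat) {p : List Char × Nat} :
    ∀ (l : List (List Char × Nat)), p ∈ l →
      PySem.Chars.startswith (u.drop i) p.1 = true →
      ∀ b, p.2 ≤ l.foldl (fun b q => if b < q.2 && PySem.Chars.startswith (u.drop i) q.1 then q.2 else b) b := by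
  intro l
  induction l with
  | nil => intro h; simp at h
  | cons q t ih =>
    intro hm hst b
    simp only [List.foldl]
    rcases List.mem_cons.1 hm with h | h
    · subst h
      refine le_trans ?_ (pv_inner_ge u i t _)
      by_cases hb : p.2 ≤ b
      · have : (b < p.2 && PySem.Chars.startswith (u.drop i) p.1) = false := by
          simp only [Bool.and_eq_false_iff]
          left; simp; omega
        simp [this]; omega
      · have : (b < p.2 && PySem.Chars.startswith (u.drop i) p.1) = true := by
          simp [hst]; omega
        simp [this]
    · exact ih h hst _

theorem pvStep_ge (u : List Char) (b i : Nat) : b ≤ pvStep u b i :=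
  pv_inner_ge u i pvRankedKeywords b

theorem pv_foldl_ge {f : Nat → Nat → Nat} (hf : ∀ b i, b ≤ f b i) :
    ∀ (l : List Nat) (b : Nat), b ≤ l.foldl f b := by
  intro l
  induction l with
  | nil => intro b; simp
  | cons a t ih => intro b; exact le_trans (hf b a) (ih (f b a))

theorem pv_foldl_lower {f : Nat → Nat → Nat} (hf : ∀ b i, b ≤ f b i) {r i : Nat}
    (hi : ∀ b, r ≤ f b i) : ∀ (l : List Nat) (b : Nat), i ∈ l → r ≤ l.foldl f b := by
  intro l
  induction l with
  | nil => intro b h; simp at h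
  | cons a t ih =>
    intro b h
    rcases List.mem_cons.1 h with h | h
    · subst h; exact le_trans (hi b) (pv_foldl_ge hf t (f b i))
    · exact ih (f b a) h

theorem pv_foldl_upper {f : Nat → Nat → Nat} {k : Nat}
    (hf : ∀ b i, b ≤ k → f b i ≤ k) : ∀ (l : List Nat) (b : Nat), b ≤ k → l.foldl f b ≤ k := by
  intro l
  induction l with
  | nil => intro b h; simpa using h
  | cons a t ih => intro b h; exact ih (f b a) (hf b a h)

-- a nonempty prefix of u.drop i forces i < u.length
theorem pv_lt_of_prefix_drop {u sub : List Char} {i : Nat}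
    (h : sub <+: u.drop i) (hs : sub ≠ []) : i < u.length := by
  have h1 := h.length_le
  have h2 : 0 < sub.length := List.length_pos_iff.2 hs
  simp only [List.length_drop] at h1
  omega

-- absence of a keyword in u means it starts at no position
theorem pv_no_start {u sub : List Char} (h : PySem.Chars.isIn sub u = false) (i : Nat) :
    PySem.Chars.startswith (u.drop i) sub = false := by
  cases hx : PySem.Chars.startswith (u.drop i) sub
  · rfl
  · have : PySem.Chars.isIn sub u = true :=
      (PySem.Chars.exists_prefix_drop_iff_isIn sub u).1 ⟨i, (PySem.Chars.startswith_iff _ _).1 hx⟩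
    simp [this] at h

-- presence of a keyword gives a scan position inside range where it starts
theorem pv_start_of_isIn {u sub : List Char} (h : PySem.Chars.isIn sub u = true) (hs : sub ≠ []) :
    ∃ i, i ∈ List.range u.length ∧ PySem.Chars.startswith (u.drop i) sub = true := by
  obtain ⟨i, hp⟩ := (PySem.Chars.exists_prefix_drop_iff_isIn sub u).2 h
  exact ⟨i, List.mem_range.2 (pv_lt_of_prefix_drop hp hs), (PySem.Chars.startswith_iff _ _).2 hp⟩

-- rank n occurring (and nothing of higher rank occurring anywhere) pins the scan to n:
theorem pv_best_lower (u : List Char) {sub : List Char} {r : Nat}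
    (hmem : (sub, r) ∈ pvRankedKeywords) (h : PySem.Chars.isIn sub u = true) (hs : sub ≠ []) :
    r ≤ (List.range u.length).foldl (pvStep u) 0 := by
  obtain ⟨i, hi, hst⟩ := pv_start_of_isIn h hs
  exact pv_foldl_lower (pvStep_ge u) (fun b => pv_inner_lower u i pvRankedKeywords hmem hst b) _ 0 hi

theorem pv_best_upper (u : List Char) {k : Nat}
    (hk : ∀ p ∈ pvRankedKeywords, PySem.Chars.isIn p.1 u = false ∨ p.2 ≤ k) :
    (List.range u.length).foldl (pvStep u) 0 ≤ k := by
  refine pv_foldl_upper (fun b i hb => ?_) _ 0 (Nat.zero_le k)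
  refine pv_inner_upper u i k pvRankedKeywords (fun p hp hst => ?_) b hb
  rcases hk p hp with h | h
  · rw [pv_no_start h i] at hst; exact absurd hst (by simp)
  · exact h

-- the keyword string literals as character lists (used to align the two ports' spellings)
theorem pv_lits : "ERROR".toList = ['E','R','R','O','R'] ∧ "CRITICAL".toList = ['C','R','I','T','I','C','A','L'] ∧
    "FATAL".toList = ['F','A','T','A','L'] ∧ "WARNING".toList = ['W','A','R','N','I','N','G'] ∧
    "WARN".toList = ['W','A','R','N'] ∧ "DEBUG".toList = ['D','E','B','U','G'] := by
  refine ⟨rfl, rfl, rfl, rfl, rfl, rfl⟩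

-- the whole equivalence over an arbitrary upper-cased character list
theorem pv_main (u : List Char) :
    (if (PySem.Chars.isIn ['E','R','R','O','R'] u ||
         (PySem.Chars.isIn ['C','R','I','T','I','C','A','L'] u ||
          PySem.Chars.isIn ['F','A','T','A','L'] u)) = true then "ERROR"
     else if (PySem.Chars.isIn ['W','A','R','N','I','N','G'] u ||
              PySem.Chars.isIn ['W','A','R','N'] u) = true then "WARNING"
     else if PySem.Chars.isIn ['D','E','B','U','G'] u = true then "DEBUG"
     else "INFO")
    = ["INFO", "DEBUG", "WARNING", "ERROR"].getD ((List.range u.length).foldl (pvStep u) 0) "INFO" := by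
  by_cases he1 : PySem.Chars.isIn ['E','R','R','O','R'] u = true
  · rw [show (List.range u.length).foldl (pvStep u) 0 = 3 from
      le_antisymm (pv_best_upper u (by intro p hp; right; fin_cases hp <;> norm_num))
        (pv_best_lower u (by decide) he1 (by decide))]
    simp [he1]
  all_goals by_cases he2 : PySem.Chars.isIn ['C','R','I','T','I','C','A','L'] u = true
  · rw [show (List.range u.length).foldl (pvStep u) 0 = 3 from
      le_antisymm (pv_best_upper u (by intro p hp; right; fin_cases hp <;> norm_num))
        (pv_best_lower u (by decide) he2 (by decide))]
    simp [he2]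
  all_goals by_cases he3 : PySem.Chars.isIn ['F','A','T','A','L'] u = true
  · rw [show (List.range u.length).foldl (pvStep u) 0 = 3 from
      le_antisymm (pv_best_upper u (by intro p hp; right; fin_cases hp <;> norm_num))
        (pv_best_lower u (by decide) he3 (by decide))]
    simp [he3]
  all_goals simp only [Bool.not_eq_true] at he1 he2 he3
  all_goals by_cases hw1 : PySem.Chars.isIn ['W','A','R','N','I','N','G'] u = true
  · rw [show (List.range u.length).foldl (pvStep u) 0 = 2 from
      le_antisymm
        (pv_best_upper u (by
          intro p hp; fin_cases hp <;> simp [pv_lits, he1, he2, he3]))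
        (pv_best_lower u (by decide) hw1 (by decide))]
    simp [he1, he2, he3, hw1]
  all_goals by_cases hw2 : PySem.Chars.isIn ['W','A','R','N'] u = true
  · rw [show (List.range u.length).foldl (pvStep u) 0 = 2 from
      le_antisymm
        (pv_best_upper u (by
          intro p hp; fin_cases hp <;> simp [pv_lits, he1, he2, he3]))
        (pv_best_lower u (by decide) hw2 (by decide))]
    simp [he1, he2, he3, hw2]
  all_goals simp only [Bool.not_eq_true] at hw1 hw2
  all_goals by_cases hd : PySem.Chars.isIn ['D','E','B','U','G'] u = true
  · rw [show (List.range u.length).foldl (pvStep u) 0 = 1 from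
      le_antisymm
        (pv_best_upper u (by
          intro p hp; fin_cases hp <;> simp [pv_lits, he1, he2, he3, hw1, hw2]))
        (pv_best_lower u (by decide) hd (by decide))]
    simp [he1, he2, he3, hw1, hw2, hd]
  · simp only [Bool.not_eq_true] at hd
    rw [show (List.range u.length).foldl (pvStep u) 0 = 0 from
      Nat.le_zero.1 (pv_best_upper u (by
        intro p hp; fin_cases hp <;> simp [pv_lits, he1, he2, he3, hw1, hw2, hd]))]
    simp [he1, he2, he3, hw1, hw2, hd]

-- ===== VERDICT =====
theorem extract_log_level_py_spec : Claim_equal_extract_log_level_py := by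
  intro message _
  unfold Spec_extract_log_level_py extract_log_level_py extract_log_level_py_alt
  simpa only [List.any_cons, List.any_nil, Bool.or_false, PySem.Str.isIn_eq, pv_lits]
    using pv_main ((PySem.Str.upper message).toList)
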